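-- pv_equiv track=rewrite | github.com/emirzoz/Tayf_v2 | scripts/generate_tailwind_lite.py | parse_prefixes
-- ===== SOURCE A (Python) =====
-- breakpoints = {
--     'sm': '640px',
--     'md': '768px',
--     'lg': '1024px',
--     'xl': '1280px',
-- }
--
-- def parse_prefixes(token: str):
--     responsive = None
--     pseudo = None
--     base = token
--     while ':' in base:
--         prefix, rest = base.split(':', 1)
--         if prefix in breakpoints:
--             responsive = prefix
--             base = rest
--             continue
--         if prefix == 'hover':
--             pseudo = ':hover'
--             base = rest
--             continue
--         if prefix == 'focus':
--             pseudo = ':focus'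
--             base = rest
--             continue
--         break
--     return responsive, pseudo, base
-- ===== SOURCE B (Python) =====
-- breakpoints = {
--     'sm': '640px',
--     'md': '768px',
--     'lg': '1024px',
--     'xl': '1280px',
-- }
--
-- def parse_prefixes(token: str):
--     parts = token.split(':')
--     responsive = None
--     pseudo = None
--     i = 0
--     while i < len(parts) - 1:
--         p = parts[i]
--         if p in breakpoints:
--             responsive = p
--         elif p in ('hover', 'focus'):
--             pseudo = ':' + p
--         else:
--             break
--         i += 1
--     return responsive, pseudo, ':'.join(parts[i:])
-- ===== Notes on version B (the rewrite author's own statement) =====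
-- stated objective: simpler
-- what changed: B splits the token once into all colon-separated segments and scans them with a forward index, rejoining the unscanned tail, instead of A's while-loop that repeatedly re-splits the shrinking base at its first colon.
import Mathlib
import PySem

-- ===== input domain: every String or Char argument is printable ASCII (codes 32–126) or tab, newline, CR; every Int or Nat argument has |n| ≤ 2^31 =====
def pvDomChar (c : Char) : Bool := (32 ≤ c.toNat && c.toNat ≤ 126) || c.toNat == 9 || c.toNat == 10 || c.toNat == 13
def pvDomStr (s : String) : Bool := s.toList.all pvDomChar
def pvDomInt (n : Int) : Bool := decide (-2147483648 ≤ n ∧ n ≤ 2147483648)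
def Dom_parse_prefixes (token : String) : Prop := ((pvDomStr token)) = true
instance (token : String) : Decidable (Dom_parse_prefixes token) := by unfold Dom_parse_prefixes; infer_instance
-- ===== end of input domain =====

-- B rewrites A's repeated split(':',1) while-loop as one eager split(':'), a forward
-- scan over the segments and a join of the unscanned tail (objective: simpler).

-- ===== PORT A =====
-- the module-level dict `breakpoints` (values carried for fidelity; only keys are tested)
def pvBreakpoints : List (List Char × List Char) :=
  [(['s','m'], ['6','4','0','p','x']), (['m','d'], ['7','6','8','p','x']),
   (['l','g'], ['1','0','2','4','p','x']), (['x','l'], ['1','2','8','0','p','x'])]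

-- termination helper for A's loop: split(':',1) strictly shrinks the base when it holds a ':'
theorem pvRestShorter (l : List Char) (h : l.contains ':' = true) :
    ((l.dropWhile (· ≠ ':')).drop 1).length < l.length := by
  have hmem : ':' ∈ l := by simpa using h
  have hne : l.dropWhile (· ≠ ':') ≠ [] := by
    intro hnil
    have := (List.dropWhile_eq_nil_iff).mp hnil
    have := this ':' hmem
    simp at this
  obtain ⟨x, xs, hx⟩ := List.exists_cons_of_ne_nil hne
  have hle : (l.dropWhile (· ≠ ':')).length ≤ l.length := List.length_dropWhile_le _ _
  rw [hx] at hle ⊢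
  simp at hle ⊢
  omega

-- A's while-loop; `prefix, rest = base.split(':', 1)` ported step for step as
-- takeWhile/dropWhile around the first ':', exact when ':' ∈ base (the loop guard)
def pvGoA (resp pseudo : Option (List Char)) (base : List Char) :
    Option (List Char) × Option (List Char) × List Char :=
  if h : base.contains ':' then
    let pfx := base.takeWhile (· ≠ ':')
    let rest := (base.dropWhile (· ≠ ':')).drop 1
    if pvBreakpoints.any (fun kv => kv.1 = pfx) then
      pvGoA (some pfx) pseudo rest
    else if pfx = ['h','o','v','e','r'] then
      pvGoA resp (some [':','h','o','v','e','r']) rest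
    else if pfx = ['f','o','c','u','s'] then
      pvGoA resp (some [':','f','o','c','u','s']) rest
    else (resp, pseudo, base)
  else (resp, pseudo, base)
termination_by base.length
decreasing_by all_goals exact pvRestShorter base h

def parse_prefixes (token : String) : Option String × Option String × String :=
  let r := pvGoA none none token.toList
  (r.1.map String.ofList, r.2.1.map String.ofList, String.ofList r.2.2)

-- ===== PORT B =====
-- token.split(':') on the character list (eager split, Python semantics: '' ↦ [''])
def pvSplitC : List Char → List (List Char)
  | [] => [[]]
  | c :: cs =>
    match pvSplitC cs with
    | [] => [[]]  -- unreachable: pvSplitC never returns []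
    | h :: t => if c = ':' then [] :: h :: t else (c :: h) :: t

-- ':'.join(parts)
def pvJoinC : List (List Char) → List Char
  | [] => []
  | [p] => p
  | p :: q :: t => p ++ ':' :: pvJoinC (q :: t)

-- B's index loop `while i < len(parts)-1`, transcribed on the remaining tail parts[i:]
def pvScanB (parts : List (List Char)) (resp pseudo : Option (List Char)) :
    Option (List Char) × Option (List Char) × List (List Char) :=
  match parts with
  | [] => (resp, pseudo, [])
  | [p] => (resp, pseudo, [p])
  | p :: q :: rest =>
    if pvBreakpoints.any (fun kv => kv.1 = p) then
      pvScanB (q :: rest) (some p) pseudo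
    else if p = ['h','o','v','e','r'] ∨ p = ['f','o','c','u','s'] then
      pvScanB (q :: rest) resp (':' :: p)
    else (resp, pseudo, p :: q :: rest)

def parse_prefixes_alt (token : String) : Option String × Option String × String :=
  let r := pvScanB (pvSplitC token.toList) none none
  (r.1.map String.ofList, r.2.1.map String.ofList, String.ofList (pvJoinC r.2.2))

-- ===== PRECONDITION & SPEC =====
def Spec_parse_prefixes (token : String) (out : Option String × Option String × String) : Prop := out = parse_prefixes_alt token
instance (token : String) (out : Option String × Option String × String) : Decidable (Spec_parse_prefixes token out) := by unfold Spec_parse_prefixes; infer_instance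

-- ===== CLAIM (what is proved, stated in full; the proofs are below) =====
def Claim_equal_parse_prefixes : Prop := ∀ (token : String), Dom_parse_prefixes token → Spec_parse_prefixes token (parse_prefixes token)

-- ===== LEMMAS AND PROOFS =====
theorem pvSplitC_ne_nil (cs : List Char) : pvSplitC cs ≠ [] := by
  cases cs with
  | nil => simp [pvSplitC]
  | cons c cs =>
    rw [pvSplitC]
    cases pvSplitC cs with
    | nil => simp
    | cons h t => dsimp only; split <;> simp

theorem pvSplitC_colonFree (cs : List Char) : ∀ p ∈ pvSplitC cs, ':' ∉ p := by
  induction cs with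
  | nil => simp [pvSplitC]
  | cons c cs ih =>
    rw [pvSplitC]
    cases hsp : pvSplitC cs with
    | nil => exact absurd hsp (pvSplitC_ne_nil cs)
    | cons h t =>
      dsimp only
      intro p hp
      by_cases hc : c = ':'
      · rw [if_pos hc] at hp
        rcases List.mem_cons.mp hp with h1 | h1
        · simp [h1]
        · exact ih p (hsp ▸ h1)
      · rw [if_neg hc] at hp
        rcases List.mem_cons.mp hp with h1 | h1
        · subst h1
          have hh := ih h (by rw [hsp]; exact List.mem_cons_self ..)
          intro hmem
          rcases List.mem_cons.mp hmem with h2 | h2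
          · exact hc h2.symm
          · exact hh h2
        · exact ih p (by rw [hsp]; exact List.mem_cons_of_mem _ h1)

theorem pvJoinC_cons_cons (p h : List Char) (t : List (List Char)) :
    pvJoinC ((p ++ h) :: t) = p ++ pvJoinC (h :: t) := by
  cases t <;> simp [pvJoinC]

theorem pvJoinC_splitC (cs : List Char) : pvJoinC (pvSplitC cs) = cs := by
  induction cs with
  | nil => simp [pvSplitC, pvJoinC]
  | cons c cs ih =>
    rw [pvSplitC]
    cases hsp : pvSplitC cs with
    | nil => exact absurd hsp (pvSplitC_ne_nil cs)
    | cons h t =>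
      dsimp only
      rw [hsp] at ih
      by_cases hc : c = ':'
      · subst hc
        rw [if_pos rfl]
        simpa [pvJoinC] using ih
      · rw [if_neg hc]
        have hch : (c :: h) = [c] ++ h := rfl
        rw [hch, pvJoinC_cons_cons]
        simpa using ih

theorem pvTakeWhile_colonFree (p t : List Char) (hp : ':' ∉ p) :
    (p ++ ':' :: t).takeWhile (· ≠ ':') = p := by
  induction p with
  | nil => simp
  | cons a as ih =>
    have ha : a ≠ ':' := fun h => hp (h ▸ List.mem_cons_self ..)
    rw [List.cons_append, List.takeWhile_cons, if_pos (by simpa using ha),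
      ih (fun h => hp (List.mem_cons_of_mem _ h))]

theorem pvDropWhile_colonFree (p t : List Char) (hp : ':' ∉ p) :
    (p ++ ':' :: t).dropWhile (· ≠ ':') = ':' :: t := by
  induction p with
  | nil => simp
  | cons a as ih =>
    have ha : a ≠ ':' := fun h => hp (h ▸ List.mem_cons_self ..)
    rw [List.cons_append, List.dropWhile_cons, if_pos (by simpa using ha),
      ih (fun h => hp (List.mem_cons_of_mem _ h))]

-- main invariant: A's loop on the joined remainder computes B's scan over the parts
theorem pvGoA_eq_scanB (parts : List (List Char)) (resp pseudo : Option (List Char))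
    (hne : parts ≠ []) (hfree : ∀ p ∈ parts, ':' ∉ p) :
    pvGoA resp pseudo (pvJoinC parts) =
      (let r := pvScanB parts resp pseudo; (r.1, r.2.1, pvJoinC r.2.2)) := by
  induction parts generalizing resp pseudo with
  | nil => exact absurd rfl hne
  | cons p rest ih =>
    cases rest with
    | nil =>
      have hp : ':' ∉ p := hfree p (List.mem_cons_self ..)
      have hc : ¬ ((pvJoinC [p]).contains ':' = true) := by
        simpa [pvJoinC] using hp
      rw [pvGoA, dif_neg hc]
      simp [pvScanB]
    | cons q rest' =>
      have hp : ':' ∉ p := hfree p (List.mem_cons_self ..)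
      have hjoin : pvJoinC (p :: q :: rest') = p ++ ':' :: pvJoinC (q :: rest') := by
        simp [pvJoinC]
      have hc : (pvJoinC (p :: q :: rest')).contains ':' = true := by
        rw [hjoin]; simp
      have htake : (pvJoinC (p :: q :: rest')).takeWhile (· ≠ ':') = p := by
        rw [hjoin]; exact pvTakeWhile_colonFree _ _ hp
      have hdrop : ((pvJoinC (p :: q :: rest')).dropWhile (· ≠ ':')).drop 1
          = pvJoinC (q :: rest') := by
        rw [hjoin, pvDropWhile_colonFree _ _ hp]; simp
      have hfree' : ∀ x ∈ q :: rest', ':' ∉ x := fun x hx => hfree x (List.mem_cons_of_mem _ hx)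
      rw [pvGoA, dif_pos hc]
      simp only [htake, hdrop]
      rw [pvScanB]
      by_cases h1 : (pvBreakpoints.any fun kv => kv.1 = p) = true
      · rw [if_pos h1, if_pos h1]
        exact ih (some p) pseudo (by simp) hfree'
      · rw [if_neg h1, if_neg h1]
        by_cases h2 : p = ['h','o','v','e','r']
        · rw [if_pos h2, if_pos (Or.inl h2)]
          have := ih resp (some [':','h','o','v','e','r']) (by simp) hfree'
          subst h2
          exact this
        · rw [if_neg h2]
          by_cases h3 : p = ['f','o','c','u','s']
          · rw [if_pos h3, if_pos (Or.inr h3)]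
            have := ih resp (some [':','f','o','c','u','s']) (by simp) hfree'
            subst h3
            exact this
          · rw [if_neg h3, if_neg (by simp [h2, h3])]

-- ===== VERDICT (by name: the statement is the Claim_ definition above) =====
theorem parse_prefixes_spec : Claim_equal_parse_prefixes := by
  intro token _
  unfold Spec_parse_prefixes parse_prefixes parse_prefixes_alt
  have h := pvGoA_eq_scanB (pvSplitC token.toList) none none
    (pvSplitC_ne_nil _) (pvSplitC_colonFree _)
  rw [pvJoinC_splitC] at h
  rw [h]
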